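-- pv_equiv track=rewrite | github.com/aljeshishe/geeksforgeek | tree/top-k-numbers3425.py | kTop
-- ===== SOURCE A (Python) =====
-- from collections import defaultdict
--
-- def kTop(a, n, k):
--     results = []
--     pairs = []
--     d = defaultdict(int)
--     for value in a:
--         old = d[value]
--         d[value] = old + 1
--         try:
--             pairs.remove((old, -value))
--         except ValueError:
--             pass
--         pairs.append((d[value], -value))
--
--         for pos in range(len(pairs) - 2, -1, -1):
--             if pairs[pos] < pairs[pos + 1]:
--                 pairs[pos], pairs[pos + 1] = pairs[pos + 1], pairs[pos]
--
--         if len(pairs) > k: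
--             pairs.pop()
--         results += [-pair[1] for pair in pairs]
--     return results
-- ===== SOURCE B (Python) =====
-- def kTop(a, n, k):
--     counts = {}
--     results = []
--     take = k if k > 0 else 0
--     for value in a:
--         counts[value] = counts.get(value, 0) + 1
--         top = sorted(((c, -v) for v, c in counts.items()), reverse=True)[:take]
--         results.extend(-negv for _, negv in top)
--     return results
-- ===== Notes on version B (the rewrite author's own statement) =====
-- stated objective: simpler
-- what changed: A maintains the top-k list incrementally (remove the stale pair, append, one bubble pass, truncate); B keeps only the count dict and recomputes the per-step top-k by fully sorting the (count, -value) pairs and taking the first k.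
import Mathlib
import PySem

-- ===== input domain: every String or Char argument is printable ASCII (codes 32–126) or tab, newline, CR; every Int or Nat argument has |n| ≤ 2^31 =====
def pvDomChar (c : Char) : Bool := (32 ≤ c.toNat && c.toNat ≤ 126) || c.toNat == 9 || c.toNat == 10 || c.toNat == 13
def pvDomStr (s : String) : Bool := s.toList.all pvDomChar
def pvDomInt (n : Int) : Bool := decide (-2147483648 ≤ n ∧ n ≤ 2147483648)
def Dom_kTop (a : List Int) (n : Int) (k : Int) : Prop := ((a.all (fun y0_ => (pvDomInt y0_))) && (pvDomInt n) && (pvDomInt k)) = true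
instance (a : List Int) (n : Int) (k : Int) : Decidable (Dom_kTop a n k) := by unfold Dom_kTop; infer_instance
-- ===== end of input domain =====

-- B replaces A's incremental remove/append/bubble/truncate maintenance of the top-k list by a
-- full re-sort of the count dictionary after each insertion (objective: simpler).

-- ===== PORT A =====

-- Python tuple comparison '(a, b) < (c, d)' on int pairs: lexicographic
def pvLt (x y : Int × Int) : Bool :=
  decide (x.1 < y.1) || (decide (x.1 = y.1) && decide (x.2 < y.2))

-- the inner loop 'for pos in range(len(pairs) - 2, -1, -1): if pairs[pos] < pairs[pos+1]: swap':
-- one right-to-left adjacent compare-and-swap pass (suffix positions first, then position 0) — exact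
def pvBubble : List (Int × Int) → List (Int × Int)
  | [] => []
  | x :: rest =>
    match pvBubble rest with
    | [] => [x]
    | y :: t => if pvLt x y then y :: x :: t else x :: y :: t

def kTopStep (k : Int) (st : List Int × List (Int × Int) × PySem.Dict Int Int) (value : Int) :
    List Int × List (Int × Int) × PySem.Dict Int Int :=
  let results := st.1
  let pairs := st.2.1
  let d := st.2.2
  -- 'old = d[value]' on defaultdict(int): a missing key reads 0; the implicit insertion of the
  -- default 0 is overwritten in place by 'd[value] = old + 1' on the next line, so a single
  -- insert is exact, including insertion order.
  let old := d.getD value 0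
  let d := d.insert value (old + 1)
  -- 'try: pairs.remove((old, -value)) except ValueError: pass'
  let pairs := match PySem.List.remove? pairs (old, -value) with
               | some p => p
               | none => pairs
  let pairs := pairs ++ [(d.getD value 0, -value)]
  let pairs := pvBubble pairs
  -- 'if len(pairs) > k: pairs.pop()' — pop() removes the last element; the list is nonempty
  -- here (an element was just appended), so dropLast is exact.
  let pairs := if (pairs.length : Int) > k then pairs.dropLast else pairs
  (results ++ pairs.map (fun p => -p.2), pairs, d)

def kTop (a : List Int) (n : Int) (k : Int) : List Int :=
  (a.foldl (kTopStep k) ([], [], PySem.Dict.mk [])).1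

-- ===== PORT B =====

def kTopAltStep (take : Int) (st : List Int × PySem.Dict Int Int) (value : Int) :
    List Int × PySem.Dict Int Int :=
  let counts := st.2.insert value (st.2.getD value 0 + 1)
  -- 'sorted(((c, -v) for v, c in counts.items()), reverse=True)[:take]' — take ≥ 0 here,
  -- so the slice is List.take.
  let top := (PySem.List.sorted2 (counts.items.map (fun p => (p.2, -p.1)))
                (fun q => q.1) (fun q => q.2) true).take take.toNat
  (st.1 ++ top.map (fun q => -q.2), counts)

def kTop_alt (a : List Int) (n : Int) (k : Int) : List Int :=
  let take := if k > 0 then k else 0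
  (a.foldl (kTopAltStep take) ([], PySem.Dict.mk [])).1

-- ===== PRECONDITION & SPEC =====
def Spec_kTop (a : List Int) (n : Int) (k : Int) (out : List Int) : Prop := out = kTop_alt a n k
instance (a : List Int) (n : Int) (k : Int) (out : List Int) : Decidable (Spec_kTop a n k out) := by unfold Spec_kTop; infer_instance

-- ===== CLAIM (what is proved, stated in full; the proofs are below) =====
def Claim_equal_kTop : Prop := ∀ (a : List Int) (n : Int) (k : Int), Dom_kTop a n k → Spec_kTop a n k (kTop a n k)

-- ===== LEMMAS AND PROOFS =====

-- the item-to-pair map '(v, c) ↦ (c, -v)'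
def pvF (p : Int × Int) : Int × Int := (p.2, -p.1)

-- strict descending order on pairs, lexicographically
def pvDesc (a b : Int × Int) : Prop := toLex b < toLex a

-- descending lexicographic insertion (x goes before the first strictly smaller element)
def insD (x : Int × Int) (l : List (Int × Int)) : List (Int × Int) :=
  PySem.List.insertBy (fun a b => pvLt b a) x l

-- full descending lexicographic sort
def sortD (l : List (Int × Int)) : List (Int × Int) :=
  PySem.List.sorted l (fun q => toLex q) true

-- invariant of the count dictionary's item list: distinct keys, all counts ≥ 1
def DInv (I : List (Int × Int)) : Prop := (I.map Prod.fst).Nodup ∧ ∀ p ∈ I, 1 ≤ p.2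

def pvKK (k : Int) : Nat := (if k > 0 then k else 0).toNat

def topk (k : Int) (I : List (Int × Int)) : List (Int × Int) :=
  (sortD (I.map pvF)).take (pvKK k)

lemma pvLt_eq (x y : Int × Int) : pvLt x y = decide (toLex x < toLex y) := by
  rw [Bool.eq_iff_iff]
  simp [pvLt, Prod.Lex.lt_iff]

lemma pvLt_iff (x y : Int × Int) : pvLt x y = true ↔ toLex x < toLex y := by
  simp [pvLt_eq]

lemma pvLt_false_iff (x y : Int × Int) : pvLt x y = false ↔ toLex y ≤ toLex x := by
  simp [pvLt_eq, not_lt]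

lemma insD_nil (x : Int × Int) : insD x [] = [x] := rfl

lemma insD_cons (x y : Int × Int) (ys : List (Int × Int)) :
    insD x (y :: ys) = if pvLt y x then x :: y :: ys else y :: insD x ys := rfl

lemma insD_length (x : Int × Int) (l : List (Int × Int)) :
    (insD x l).length = l.length + 1 := by
  induction l with
  | nil => rfl
  | cons y ys ih => rw [insD_cons]; split <;> simp [ih]

lemma insD_perm (x : Int × Int) (l : List (Int × Int)) : (insD x l).Perm (x :: l) := by
  induction l with
  | nil => rfl
  | cons y ys ih =>
    rw [insD_cons]
    split
    · exact List.Perm.refl _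
    · exact (ih.cons y).trans (List.Perm.swap x y ys)

lemma insD_append_right (x : Int × Int) (M R : List (Int × Int))
    (h : ∀ r ∈ R, pvLt r x = true) : insD x (M ++ R) = insD x M ++ R := by
  induction M with
  | nil =>
    cases R with
    | nil => rfl
    | cons r R' => simp [insD_cons, insD_nil, h r (by simp)]
  | cons m M' ih =>
    rw [List.cons_append, insD_cons, insD_cons]
    split
    · rfl
    · rw [ih, List.cons_append]

lemma insD_append_of_exists (x : Int × Int) (M Z : List (Int × Int))
    (h : ∃ y ∈ M, pvLt y x = true) : insD x (M ++ Z) = insD x M ++ Z := by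
  induction M with
  | nil => simp at h
  | cons m M' ih =>
    rw [List.cons_append, insD_cons, insD_cons]
    by_cases hm : pvLt m x = true
    · rw [if_pos hm, if_pos hm]; rfl
    · obtain ⟨y, hy, hlt⟩ := h
      rcases List.mem_cons.mp hy with rfl | hy
      · exact absurd hlt hm
      · rw [if_neg hm, if_neg hm, ih ⟨y, hy, hlt⟩, List.cons_append]

lemma insD_append_not (x : Int × Int) (M Z : List (Int × Int))
    (h : ∀ y ∈ M, pvLt y x = false) : insD x (M ++ Z) = M ++ insD x Z := by
  induction M with
  | nil => rfl
  | cons m M' ih =>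
    rw [List.cons_append, insD_cons, if_neg (by simp [h m (by simp)]), ih]
    · rfl
    · exact fun y hy => h y (by simp [hy])

lemma insD_of_forall_not (x : Int × Int) (M : List (Int × Int))
    (h : ∀ y ∈ M, pvLt y x = false) : insD x M = M ++ [x] :=
  PySem.List.insertBy_of_forall_not_before _ x M h

lemma insD_pairwise (x : Int × Int) (M : List (Int × Int))
    (hM : M.Pairwise pvDesc) (hx : x ∉ M) : (insD x M).Pairwise pvDesc := by
  induction M with
  | nil => simp [insD_nil]
  | cons m M' ih =>
    rw [List.pairwise_cons] at hM
    obtain ⟨hm, hM'⟩ := hM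
    rw [insD_cons]
    by_cases hc : pvLt m x = true
    · rw [if_pos hc]
      have hmx : toLex m < toLex x := (pvLt_iff _ _).mp hc
      refine List.Pairwise.cons ?_ (List.Pairwise.cons hm hM')
      intro z hz
      rcases List.mem_cons.mp hz with rfl | hz
      · exact hmx
      · exact lt_trans (hm z hz) hmx
    · rw [if_neg hc]
      refine List.Pairwise.cons ?_ (ih hM' (fun hmem => hx (List.mem_cons_of_mem _ hmem)))
      intro z hz
      have hz' : z = x ∨ z ∈ M' := by
        have := (insD_perm x M').mem_iff.mp hz
        simpa using this
      rcases hz' with rfl | hz'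
      · have hle : toLex z ≤ toLex m := (pvLt_false_iff m z).mp (Bool.not_eq_true _ ▸ eq_false_of_ne_true hc)
        refine lt_of_le_of_ne hle (fun hEq => hx ?_)
        have : z = m := toLex.injective hEq
        simp [this]
      · exact hm z hz'

lemma bubble_eq_insD (x : Int × Int) (M : List (Int × Int)) (hM : M.Pairwise pvDesc) :
    pvBubble (M ++ [x]) = insD x M := by
  induction M with
  | nil => rfl
  | cons a M' ih =>
    have hM' : M'.Pairwise pvDesc := (List.pairwise_cons.mp hM).2
    have hrec := ih hM'
    cases M' with
    | nil =>
      by_cases hax : pvLt a x = true <;>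
        simp [pvBubble, insD_cons, insD_nil, hax]
    | cons b M'' =>
      show (match pvBubble ((b :: M'') ++ [x]) with
            | [] => [a] | y :: t => if pvLt a y then y :: a :: t else a :: y :: t) = insD x (a :: b :: M'')
      rw [hrec, insD_cons (x := x) (y := b)]
      by_cases hbx : pvLt b x = true
      · rw [if_pos hbx]
        show (if pvLt a x then x :: a :: b :: M'' else a :: x :: b :: M'') = insD x (a :: b :: M'')
        rw [insD_cons]
        by_cases hax : pvLt a x = true
        · simp [hax]
        · simp [hax, insD_cons, hbx]
      · rw [if_neg hbx]
        have hab : pvDesc a b := (List.pairwise_cons.mp hM).1 b (by simp)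
        have h1 : pvLt a b = false := by rw [pvLt_false_iff]; exact le_of_lt hab
        have h2 : pvLt a x = false := by
          rw [pvLt_false_iff]
          have hxb : toLex x ≤ toLex b := (pvLt_false_iff b x).mp (eq_false_of_ne_true hbx)
          exact le_trans hxb (le_of_lt hab)
        show (if pvLt a b then b :: a :: insD x M'' else a :: b :: insD x M'') = insD x (a :: b :: M'')
        rw [if_neg (by simp [h1]), insD_cons, if_neg (by simp [h2]), insD_cons, if_neg (by simp [hbx])]

lemma removeFB (l : List (Int × Int)) (v : Int × Int) :
    (match PySem.List.remove? l v with | some p => p | none => l) = l.erase v := by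
  simp only [PySem.List.remove?]
  rw [List.erase_eq_eraseIdx]
  cases h : List.idxOf? v l <;> simp

-- ===== the core step lemma on sorted lists =====
lemma core (L : List (Int × Int)) (k : Int) (e x : Int × Int)
    (hL : L.Pairwise pvDesc)
    (hsnd : ∀ p ∈ L, p.2 = x.2 → p = e)
    (hex : toLex e < toLex x) :
    (let p3 := pvBubble ((L.take (pvKK k)).erase e ++ [x]);
     if (p3.length : Int) > k then p3.dropLast else p3)
      = (insD x (L.erase e)).take (pvKK k) := by
  have hxL : x ∉ L := by
    intro hxm
    have hxe' : x = e := hsnd x hxm rfl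
    rw [hxe'] at hex
    exact lt_irrefl _ hex
  set kk := pvKK k with hkk
  have hk_cases : ((0:Int) < k ∧ (kk : Int) = k) ∨ (k ≤ 0 ∧ kk = 0) := by
    by_cases h : k > 0
    · refine Or.inl ⟨h, ?_⟩
      rw [hkk]; unfold pvKK; rw [if_pos h, Int.toNat_of_nonneg (le_of_lt h)]
    · refine Or.inr ⟨le_of_not_gt h, ?_⟩
      rw [hkk]; unfold pvKK; rw [if_neg h]; rfl
  have hPR : L = L.take kk ++ L.drop kk := (List.take_append_drop kk L).symm
  set P := L.take kk with hPdef
  set R := L.drop kk with hRdef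
  have hP : P.Pairwise pvDesc := List.Pairwise.sublist (List.take_sublist _ _) hL
  have hsplit := List.pairwise_append.mp (hPR ▸ hL)
  have hcross : ∀ p ∈ P, ∀ r ∈ R, pvDesc p r := hsplit.2.2
  have hPlen : P.length = min kk L.length := List.length_take
  have hxP : x ∉ P := fun hm => hxL (List.take_subset _ _ hm)
  show (if ((pvBubble (P.erase e ++ [x])).length : Int) > k
          then (pvBubble (P.erase e ++ [x])).dropLast else pvBubble (P.erase e ++ [x]))
        = (insD x (L.erase e)).take kk
  by_cases he : e ∈ P
  · -- the removed pair sat inside the kept top-k prefix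
    have hp1 : (P.erase e).Pairwise pvDesc := List.Pairwise.sublist List.erase_sublist hP
    have hb : pvBubble (P.erase e ++ [x]) = insD x (P.erase e) := bubble_eq_insD x _ hp1
    have hPpos : 0 < P.length := List.length_pos_of_mem he
    have hlen : (insD x (P.erase e)).length = P.length := by
      rw [insD_length, List.length_erase_of_mem he]; omega
    have hkpos : 0 < kk := by
      rcases Nat.eq_zero_or_pos kk with h0 | h
      · exfalso; rw [hPdef, h0] at hPpos; simp at hPpos
      · exact h
    rcases hk_cases with ⟨hk, hkkk⟩ | ⟨hk, hkkk⟩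
    swap
    · omega
    rw [hb]
    have hPle : P.length ≤ kk := by rw [hPlen]; exact min_le_left _ _
    have hnopop : ¬ (((insD x (P.erase e)).length : Int) > k) := by rw [hlen]; omega
    rw [if_neg hnopop]
    have hR : ∀ r ∈ R, pvLt r x = true := by
      intro r hr; rw [pvLt_iff]; exact lt_trans (hcross e he r hr) hex
    have hEL : L.erase e = P.erase e ++ R := by
      conv_lhs => rw [hPR]
      exact List.erase_append_left R he
    rw [hEL, insD_append_right x _ R hR]
    by_cases hfull : P.length = kk
    · rw [List.take_left' (hlen.trans hfull)]
    · have hLlt : L.length < kk := by omega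
      have hRnil : R = [] := by rw [hRdef]; exact List.drop_eq_nil_of_le (le_of_lt hLlt)
      rw [hRnil, List.append_nil, List.take_of_length_le (by omega)]
  · -- the removed pair was not among the kept top-k prefix
    rw [List.erase_of_not_mem he, bubble_eq_insD x P hP]
    have hlen : (insD x P).length = P.length + 1 := insD_length x P
    have hEL : L.erase e = P ++ R.erase e := by
      conv_lhs => rw [hPR]
      exact List.erase_append_right R he
    rw [hEL]
    by_cases hfull : P.length = kk
    · have hpop : ((insD x P).length : Int) > k := by rw [hlen]; omega
      rw [if_pos hpop]
      by_cases hcmp : ∃ y ∈ P, pvLt y x = true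
      · rw [insD_append_of_exists x P _ hcmp,
            List.take_append_of_le_length (by omega : kk ≤ (insD x P).length),
            List.dropLast_eq_take]
        congr 1
        omega
      · have hcmp' : ∀ y ∈ P, pvLt y x = false :=
          fun y hy => eq_false_of_ne_true (fun ht => hcmp ⟨y, hy, ht⟩)
        rw [insD_of_forall_not x P hcmp', List.dropLast_concat,
            insD_append_not x P _ hcmp', List.take_left' hfull]
    · have hPlt : P.length < kk := lt_of_le_of_ne (by rw [hPlen]; exact min_le_left _ _) hfull
      rcases hk_cases with ⟨hk, hkkk⟩ | ⟨hk, hkkk⟩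
      · have hnopop : ¬ (((insD x P).length : Int) > k) := by rw [hlen]; omega
        rw [if_neg hnopop]
        have hLlt : L.length < kk := by omega
        have hRnil : R = [] := by rw [hRdef]; exact List.drop_eq_nil_of_le (le_of_lt hLlt)
        rw [hRnil, List.erase_nil, List.append_nil, List.take_of_length_le (by omega)]
      · omega

-- ===== dictionary facts =====

lemma dict_not_contains (d : PySem.Dict Int Int) (v : Int) (h : d.contains v = false) :
    d.getD v 0 = 0 ∧ ∀ p ∈ d.items, p.1 ≠ v := by
  have h' : ∀ p ∈ d.items, (p.1 == v) = false := by
    intro p hp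
    by_contra hb
    have : d.contains v = true := by
      simp only [PySem.Dict.contains, List.any_eq_true]
      exact ⟨p, hp, by simpa using hb⟩
    simp [this] at h
  constructor
  · have hf : List.find? (fun p => p.1 == v) d.items = none :=
      List.find?_eq_none.mpr (fun p hp => by simp [h' p hp])
    simp [PySem.Dict.getD, PySem.Dict.get?, hf]
  · intro p hp
    simpa using h' p hp

lemma dict_contains_mem (d : PySem.Dict Int Int) (v : Int) (h : d.contains v = true) :
    (v, d.getD v 0) ∈ d.items := by
  simp only [PySem.Dict.contains, List.any_eq_true] at h
  obtain ⟨p, hp, hpv⟩ := h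
  cases hf : List.find? (fun q => q.1 == v) d.items with
  | none =>
    exact absurd hpv (by simpa using List.find?_eq_none.mp hf p hp)
  | some q =>
    have hq1 : q.1 = v := by simpa using List.find?_some hf
    have hqm : q ∈ d.items := List.mem_of_find?_eq_some hf
    have : d.getD v 0 = q.2 := by simp [PySem.Dict.getD, PySem.Dict.get?, hf]
    rw [this, ← hq1]
    exact hqm

lemma items_insert_not_contains (d : PySem.Dict Int Int) (v c : Int) (h : d.contains v = false) :
    (d.insert v c).items = d.items ++ [(v, c)] := by
  simp [PySem.Dict.insert, h]

lemma items_insert_contains (d : PySem.Dict Int Int) (v c : Int) (h : d.contains v = true) :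
    (d.insert v c).items = d.items.map (fun p => if p.1 == v then (v, c) else p) := by
  simp [PySem.Dict.insert, h]

lemma getD_insert_self (d : PySem.Dict Int Int) (v c : Int) :
    (d.insert v c).getD v 0 = c := by
  simp [PySem.Dict.getD, PySem.Dict.get?_insert_self]

lemma replace_perm (I : List (Int × Int)) (v old : Int)
    (hnd : (I.map Prod.fst).Nodup) (hmem : (v, old) ∈ I) :
    ((I.map (fun p => if p.1 == v then (v, old + 1) else p)).map pvF).Perm
      ((old + 1, -v) :: ((I.map pvF).erase (old, -v))) := by
  induction I with
  | nil => simp at hmem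
  | cons q I' ih =>
    have hh := hnd
    simp only [List.map_cons, List.nodup_cons] at hh
    rcases List.mem_cons.mp hmem with heq | hmem'
    · -- the head is the v-entry
      have hq : q = (v, old) := heq.symm
      subst hq
      have hv : v ∉ I'.map Prod.fst := hh.1
      have hnv : ∀ p ∈ I', p.1 ≠ v := fun p hp hpv =>
        hv (hpv ▸ List.mem_map_of_mem (f := Prod.fst) hp)
      have hrepl : I'.map (fun p => if p.1 == v then (v, old + 1) else p) = I' := by
        have := List.map_congr_left (l := I')
          (f := fun p : Int × Int => if p.1 == v then (v, old + 1) else p) (g := id)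
          (fun p hp => by simp [hnv p hp])
        simpa using this
      simp only [List.map_cons, hrepl]
      have hhd : pvF (v, old) = (old, -v) := rfl
      rw [hhd, List.erase_cons_head]
      simp [pvF]
    · -- the head is a different key
      have hqv : q.1 ≠ v := by
        intro hq1
        have hm : v ∈ I'.map Prod.fst := by
          simpa using List.mem_map_of_mem (f := Prod.fst) hmem'
        exact hh.1 (by rw [hq1]; exact hm)
      have hne : pvF q ≠ (old, -v) := by
        intro hEq
        have : -q.1 = -v := congrArg Prod.snd hEq
        exact hqv (by omega)
      have step1 : ((q :: I').map (fun p => if p.1 == v then (v, old + 1) else p)).map pvF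
          = pvF q :: (I'.map (fun p => if p.1 == v then (v, old + 1) else p)).map pvF := by
        simp [hqv]
      rw [step1, List.map_cons, List.erase_cons_tail (by simpa using hne)]
      exact ((ih hh.2 hmem').cons (pvF q)).trans (List.Perm.swap _ _ _)

lemma DInv_insert (d : PySem.Dict Int Int) (v : Int) (h : DInv d.items) :
    DInv ((d.insert v (d.getD v 0 + 1)).items) := by
  obtain ⟨hnd, hval⟩ := h
  by_cases hc : d.contains v = true
  · rw [items_insert_contains d v _ hc]
    constructor
    · have hfst : ((d.items.map (fun p => if p.1 == v then (v, d.getD v 0 + 1) else p)).map Prod.fst)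
          = d.items.map Prod.fst := by
        rw [List.map_map]
        apply List.map_congr_left
        intro p hp
        by_cases hpv : p.1 = v <;> simp [hpv]
      rw [hfst]; exact hnd
    · intro p hp
      obtain ⟨q, hq, rfl⟩ := List.mem_map.mp hp
      by_cases hpv : q.1 = v
      · have hmem : (v, d.getD v 0) ∈ d.items := dict_contains_mem d v hc
        have h1 := hval _ hmem
        simp only [hpv, beq_self_eq_true, if_pos]
        simp at h1 ⊢
        omega
      · rw [if_neg (by simpa using hpv)]
        exact hval q hq
  · obtain ⟨h0, hkeys⟩ := dict_not_contains d v (eq_false_of_ne_true hc)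
    rw [items_insert_not_contains d v _ (eq_false_of_ne_true hc)]
    constructor
    · rw [List.map_append, List.nodup_append]
      refine ⟨hnd, by simp, ?_⟩
      intro a ha b hbm hab
      obtain ⟨q, hq, hq1⟩ := List.mem_map.mp ha
      have hbv : b = v := by simpa using hbm
      exact hkeys q hq (by rw [hq1, hab, hbv])
    · intro p hp
      rcases List.mem_append.mp hp with hmm | hmm
      · exact hval p hmm
      · simp at hmm
        rw [hmm, h0]
        norm_num

lemma sortD_snd_nodup (I : List (Int × Int)) (h : DInv I) :
    ((sortD (I.map pvF)).map Prod.snd).Nodup := by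
  have he : (I.map pvF).map Prod.snd = (I.map Prod.fst).map (fun z => -z) := by
    rw [List.map_map, List.map_map]
    apply List.map_congr_left
    intro p hp
    simp [pvF]
  have h1 : ((I.map pvF).map Prod.snd).Nodup := by
    rw [he]
    exact h.1.map (fun a b hab => by omega)
  have hperm : (sortD (I.map pvF)).Perm (I.map pvF) := PySem.List.sorted_perm _ _ _
  exact ((hperm.map Prod.snd).nodup_iff).mpr h1

lemma sortD_pairwise (I : List (Int × Int)) (h : DInv I) :
    (sortD (I.map pvF)).Pairwise pvDesc := by
  have hle := PySem.List.sorted_pairwise_rev (I.map pvF) (fun q => toLex q)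
  have hsnd := sortD_snd_nodup I h
  have hne : (sortD (I.map pvF)).Pairwise (fun a b => a.2 ≠ b.2) := List.pairwise_map.mp hsnd
  exact (hle.and hne).imp
    (fun hab => lt_of_le_of_ne hab.1
      (fun hEq => hab.2 (congrArg Prod.snd (toLex.injective hEq)).symm))

lemma sorted2_eq_sortD (l : List (Int × Int)) :
    PySem.List.sorted2 l (fun q => q.1) (fun q => q.2) true = sortD l := by
  have hb : (fun a b : Int × Int => decide (b.1 < a.1) || (!decide (a.1 < b.1) && decide (b.2 < a.2)))
      = fun a b : Int × Int => decide (toLex b < toLex a) := by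
    funext a b
    rw [Bool.eq_iff_iff]
    simp only [Bool.or_eq_true, Bool.and_eq_true, decide_eq_true_eq, Bool.not_eq_true',
      decide_eq_false_iff_not, Prod.Lex.lt_iff, ofLex_toLex]
    omega
  simp only [PySem.List.sorted2, PySem.List.sorted, sortD, if_true]
  rw [hb]

-- the v-entry is the only pair of the sorted list whose second component is -v
lemma snd_unique (d : PySem.Dict Int Int) (h : DInv d.items) (v : Int) :
    ∀ p ∈ sortD (d.items.map pvF), p.2 = -v → p = (d.getD v 0, -v) := by
  intro p hp hp2
  have hpm : p ∈ d.items.map pvF := (PySem.List.mem_sorted _ _ _ p).mp hp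
  obtain ⟨q, hq, rfl⟩ := List.mem_map.mp hpm
  have hq1 : q.1 = v := by
    simp [pvF] at hp2
    omega
  have hc : d.contains v = true := by
    simp only [PySem.Dict.contains, List.any_eq_true]
    exact ⟨q, hq, by simp [hq1]⟩
  have hm := dict_contains_mem d v hc
  have hqe : q = (v, d.getD v 0) := List.inj_on_of_nodup_map h.1 hq hm (by simp [hq1])
  rw [hqe]
  simp [pvF]

-- the new sorted list after one insertion
lemma sortD_insert (d : PySem.Dict Int Int) (v : Int) (h : DInv d.items) :
    sortD (((d.insert v (d.getD v 0 + 1)).items).map pvF) =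
      insD (d.getD v 0 + 1, -v) ((sortD (d.items.map pvF)).erase (d.getD v 0, -v)) := by
  unfold sortD
  apply PySem.List.sorted_rev_eq_of_perm_of_pairwise_gt
  · -- permutation
    have p1 := insD_perm (d.getD v 0 + 1, -v) ((sortD (d.items.map pvF)).erase (d.getD v 0, -v))
    have p2 : ((sortD (d.items.map pvF)).erase (d.getD v 0, -v)).Perm
        ((d.items.map pvF).erase (d.getD v 0, -v)) :=
      (PySem.List.sorted_perm _ _ _).erase _
    refine p1.trans ((p2.cons _).trans ?_)
    by_cases hc : d.contains v = true
    · rw [items_insert_contains d v _ hc]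
      exact (replace_perm d.items v (d.getD v 0) h.1 (dict_contains_mem d v hc)).symm
    · obtain ⟨h0, hkeys⟩ := dict_not_contains d v (eq_false_of_ne_true hc)
      rw [items_insert_not_contains d v _ (eq_false_of_ne_true hc)]
      have hnm : (d.getD v 0, -v) ∉ d.items.map pvF := by
        intro hm
        obtain ⟨q, hq, hEq⟩ := List.mem_map.mp hm
        have : q.1 = v := by
          have := congrArg Prod.snd hEq
          simp [pvF] at this
          omega
        exact hkeys q hq this
      rw [List.erase_of_not_mem hnm]
      have hmap : (d.items ++ [(v, d.getD v 0 + 1)]).map pvF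
          = d.items.map pvF ++ [(d.getD v 0 + 1, -v)] := by simp [pvF]
      rw [hmap]
      exact (List.perm_append_singleton _ _).symm
  · -- strict descending
    have hpw : (insD (d.getD v 0 + 1, -v) ((sortD (d.items.map pvF)).erase (d.getD v 0, -v))).Pairwise pvDesc := by
      apply insD_pairwise
      · exact List.Pairwise.sublist List.erase_sublist (sortD_pairwise d.items h)
      · intro hmem
        have := snd_unique d h v _ (List.mem_of_mem_erase hmem) rfl
        have := congrArg Prod.fst this
        simp at this
    exact hpw

lemma stepA (k v : Int) (res : List Int) (d : PySem.Dict Int Int) (h : DInv d.items) :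
    kTopStep k (res, topk k d.items, d) v =
      ((res ++ (topk k ((d.insert v (d.getD v 0 + 1)).items)).map (fun p => -p.2)),
        topk k ((d.insert v (d.getD v 0 + 1)).items), d.insert v (d.getD v 0 + 1)) := by
  have hDI : DInv d.items := h
  obtain ⟨hnd, hval⟩ := h
  have hsnd : ∀ p ∈ sortD (d.items.map pvF), p.2 = ((d.getD v 0 + 1, -v) : Int × Int).2
      → p = (d.getD v 0, -v) := by
    intro p hp hp2
    exact snd_unique d hDI v p hp hp2
  have hex : toLex ((d.getD v 0, -v) : Int × Int) < toLex ((d.getD v 0 + 1, -v) : Int × Int) := by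
    rw [Prod.Lex.lt_iff]
    left
    simp
  have hcore := core (sortD (d.items.map pvF)) k (d.getD v 0, -v) (d.getD v 0 + 1, -v)
    (sortD_pairwise d.items hDI) hsnd hex
  simp only [kTopStep, topk]
  rw [removeFB, getD_insert_self, sortD_insert d v hDI, hcore]

lemma stepB (k v : Int) (res : List Int) (d : PySem.Dict Int Int) :
    kTopAltStep (if k > 0 then k else 0) (res, d) v =
      ((res ++ (topk k ((d.insert v (d.getD v 0 + 1)).items)).map (fun p => -p.2)),
        d.insert v (d.getD v 0 + 1)) := by
  simp only [kTopAltStep, topk, sorted2_eq_sortD, pvKK]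
  rfl

lemma loop (l : List Int) (k : Int) : ∀ (res : List Int) (d : PySem.Dict Int Int), DInv d.items →
    (l.foldl (kTopStep k) (res, topk k d.items, d)).1 =
      (l.foldl (kTopAltStep (if k > 0 then k else 0)) (res, d)).1 := by
  induction l with
  | nil => intro res d h; rfl
  | cons v l ih =>
    intro res d h
    simp only [List.foldl_cons]
    rw [stepA k v res d h, stepB k v res d]
    exact ih _ _ (DInv_insert d v h)

-- ===== VERDICT (by name: the statement is the Claim_ definition above) =====
theorem kTop_spec : Claim_equal_kTop := by
  intro a n k _
  unfold Spec_kTop kTop kTop_alt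
  have h0 : DInv (PySem.Dict.mk ([] : List (Int × Int))).items := by
    constructor <;> simp
  have := loop a k [] (PySem.Dict.mk []) h0
  simpa [topk, sortD, PySem.List.sorted] using this
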